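-- pv_equiv track=rewrite | github.com/mapbox/mapbox-navigation-android | scripts/validate_changelog_utils.py | group_by_versions
-- ===== SOURCE A (Python) =====
-- def is_line_not_blank(line):
--     return len(line.strip()) > 0
--
-- def group_by_versions(lines):
--     groups = {}
--     group = []
--     group_name = ""
--     for line in lines:
--         if line.startswith("##") and len(line) > 2 and line[2] != '#':
--             if (len(group) > 0):
--                 if len(group_name.strip()) > 0:
--                     groups[group_name] = group
--                 group = []
--             group_name = line
--         elif is_line_not_blank(line):
--             group.append(line)
--     if len(group) > 0 and len(group_name.strip()) > 0:
--         groups[group_name] = group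
--     return groups
-- ===== SOURCE B (Python) =====
-- def group_by_versions(lines):
--     # pass 1: partition into (header, raw body) segments; pre-header lines go under key ""
--     segments = []
--     key = ""
--     body = []
--     for line in lines:
--         if line.startswith("##") and len(line) > 2 and line[2] != '#':
--             segments.append((key, body))
--             key = line
--             body = []
--         else:
--             body.append(line)
--     segments.append((key, body))
--     # pass 2: keep each segment's non-blank lines under its header (last write wins)
--     groups = {}
--     for key, body in segments:
--         filtered = [l for l in body if len(l.strip()) > 0]
--         if len(filtered) > 0 and len(key.strip()) > 0:
--             groups[key] = filtered
--     return groups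
-- ===== Notes on version B (the rewrite author's own statement) =====
-- stated objective: alternative
-- what changed: Replaces the single stateful loop that accumulates/flushes groups with a two-pass decomposition: first partition the lines into (header, raw body) segments, then filter each segment's blank lines and insert the non-empty, non-blank-keyed ones into the dict.
import Mathlib
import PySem

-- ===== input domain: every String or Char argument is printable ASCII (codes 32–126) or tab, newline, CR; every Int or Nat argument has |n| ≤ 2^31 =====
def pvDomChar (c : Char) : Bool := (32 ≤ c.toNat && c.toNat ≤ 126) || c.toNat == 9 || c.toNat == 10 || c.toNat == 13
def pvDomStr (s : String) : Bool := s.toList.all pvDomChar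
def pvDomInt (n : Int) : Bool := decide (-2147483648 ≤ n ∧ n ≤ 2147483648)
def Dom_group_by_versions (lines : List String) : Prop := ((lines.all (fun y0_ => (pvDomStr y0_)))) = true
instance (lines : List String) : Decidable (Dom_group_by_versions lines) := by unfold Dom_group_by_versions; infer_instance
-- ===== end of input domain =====

-- B replaces A's single stateful accumulate-and-flush loop by a two-pass decomposition
-- (partition into header segments, then filter blanks and insert); same cost, alternative structure.

-- ===== PORT A =====
def is_line_not_blank (line : String) : Bool :=
  decide (PySem.Str.len (PySem.Str.strip line) > 0)

def pvGroupStepA (st : PySem.Dict String (List String) × List String × String)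
    (line : String) : PySem.Dict String (List String) × List String × String :=
  let groups := st.1
  let group := st.2.1
  let group_name := st.2.2
  if PySem.Str.startswith line "##" && decide (PySem.Str.len line > 2)
      && (PySem.Str.pyGet? line 2 != some '#') then
    if group.length > 0 then
      if PySem.Str.len (PySem.Str.strip group_name) > 0 then
        (groups.insert group_name group, ([] : List String), line)
      else (groups, ([] : List String), line)
    else (groups, group, line)
  else if is_line_not_blank line then (groups, group ++ [line], group_name)
  else (groups, group, group_name)

def group_by_versions (lines : List String) : List (String × List String) :=
  let st := lines.foldl pvGroupStepA (PySem.Dict.empty, ([] : List String), "")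
  (if st.2.1.length > 0 ∧ PySem.Str.len (PySem.Str.strip st.2.2) > 0 then
      st.1.insert st.2.2 st.2.1
    else st.1).items

-- ===== PORT B =====
def pvSegStep (st : List (String × List String) × String × List String)
    (line : String) : List (String × List String) × String × List String :=
  let segs := st.1
  let key := st.2.1
  let body := st.2.2
  if PySem.Str.startswith line "##" && decide (PySem.Str.len line > 2)
      && (PySem.Str.pyGet? line 2 != some '#') then
    (segs ++ [(key, body)], line, ([] : List String))
  else (segs, key, body ++ [line])

def pvInsertSeg (groups : PySem.Dict String (List String))
    (seg : String × List String) : PySem.Dict String (List String) :=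
  let filtered := seg.2.filter (fun l => decide (PySem.Str.len (PySem.Str.strip l) > 0))
  if filtered.length > 0 ∧ PySem.Str.len (PySem.Str.strip seg.1) > 0 then
    groups.insert seg.1 filtered
  else groups

def group_by_versions_alt (lines : List String) : List (String × List String) :=
  let st := lines.foldl pvSegStep (([] : List (String × List String)), "", ([] : List String))
  ((st.1 ++ [(st.2.1, st.2.2)]).foldl pvInsertSeg PySem.Dict.empty).items

-- ===== PRECONDITION & SPEC =====
def Spec_group_by_versions (lines : List String) (out : List (String × List String)) : Prop := out = group_by_versions_alt lines
instance (lines : List String) (out : List (String × List String)) : Decidable (Spec_group_by_versions lines out) := by unfold Spec_group_by_versions; infer_instance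

-- ===== CLAIM (what is proved, stated in full; the proofs are below) =====
def Claim_equal_group_by_versions : Prop := ∀ (lines : List String), Dom_group_by_versions lines → Spec_group_by_versions lines (group_by_versions lines)

-- ===== LEMMAS AND PROOFS =====

def pvFinishA (st : PySem.Dict String (List String) × List String × String) :
    PySem.Dict String (List String) :=
  if st.2.1.length > 0 ∧ PySem.Str.len (PySem.Str.strip st.2.2) > 0 then
    st.1.insert st.2.2 st.2.1
  else st.1

-- the segment list B's first pass produces, written as a structural recursion
def pvSegsFrom (key : String) (body : List String) : List String → List (String × List String)
  | [] => [(key, body)]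
  | l :: ls =>
    if PySem.Str.startswith l "##" && decide (PySem.Str.len l > 2)
        && (PySem.Str.pyGet? l 2 != some '#') then
      (key, body) :: pvSegsFrom l [] ls
    else pvSegsFrom key (body ++ [l]) ls

theorem pvA_eq (lines : List String) :
    group_by_versions lines
      = (pvFinishA (lines.foldl pvGroupStepA (PySem.Dict.empty, ([] : List String), ""))).items := rfl

theorem pvB_eq (lines : List String) :
    group_by_versions_alt lines
      = (((lines.foldl pvSegStep (([] : List (String × List String)), "", ([] : List String))).1
          ++ [((lines.foldl pvSegStep (([] : List (String × List String)), "", ([] : List String))).2.1,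
               (lines.foldl pvSegStep (([] : List (String × List String)), "", ([] : List String))).2.2)]).foldl
          pvInsertSeg PySem.Dict.empty).items := rfl

theorem pvSeg_loop (lines : List String) :
    ∀ (segs : List (String × List String)) (key : String) (body : List String),
      (lines.foldl pvSegStep (segs, key, body)).1
        ++ [((lines.foldl pvSegStep (segs, key, body)).2.1,
             (lines.foldl pvSegStep (segs, key, body)).2.2)]
      = segs ++ pvSegsFrom key body lines := by
  induction lines with
  | nil => intro segs key body; simp [pvSegsFrom]
  | cons l ls ih =>
    intro segs key body
    by_cases h : (PySem.Str.startswith l "##" && decide (PySem.Str.len l > 2)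
        && (PySem.Str.pyGet? l 2 != some '#')) = true
    · have hstep : pvSegStep (segs, key, body) l = (segs ++ [(key, body)], l, ([] : List String)) := by
        simp only [pvSegStep]; rw [if_pos h]
      rw [List.foldl_cons, hstep, ih (segs ++ [(key, body)]) l []]
      have hseg : pvSegsFrom key body (l :: ls) = (key, body) :: pvSegsFrom l [] ls := by
        simp only [pvSegsFrom]; rw [if_pos h]
      rw [hseg]
      simp
    · have hstep : pvSegStep (segs, key, body) l = (segs, key, body ++ [l]) := by
        simp only [pvSegStep]; rw [if_neg h]
      have hseg : pvSegsFrom key body (l :: ls) = pvSegsFrom key (body ++ [l]) ls := by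
        simp only [pvSegsFrom]; rw [if_neg h]
      rw [List.foldl_cons, hstep, ih segs key (body ++ [l]), hseg]

theorem pvMain (lines : List String) :
    ∀ (groups : PySem.Dict String (List String)) (key : String) (body : List String),
      pvFinishA (lines.foldl pvGroupStepA
          (groups, body.filter (fun l => decide (PySem.Str.len (PySem.Str.strip l) > 0)), key))
      = (pvSegsFrom key body lines).foldl pvInsertSeg groups := by
  induction lines with
  | nil =>
    intro groups key body
    rfl
  | cons l ls ih =>
    intro groups key body
    by_cases h : (PySem.Str.startswith l "##" && decide (PySem.Str.len l > 2)
        && (PySem.Str.pyGet? l 2 != some '#')) = true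
    · have hseg : pvSegsFrom key body (l :: ls) = (key, body) :: pvSegsFrom l [] ls := by
        simp only [pvSegsFrom]; rw [if_pos h]
      rw [hseg, List.foldl_cons]
      by_cases hp : (body.filter (fun l => decide (PySem.Str.len (PySem.Str.strip l) > 0))).length > 0
      · by_cases hk : PySem.Str.len (PySem.Str.strip key) > 0
        · have hstep : pvGroupStepA
              (groups, body.filter (fun l => decide (PySem.Str.len (PySem.Str.strip l) > 0)), key) l
              = (groups.insert key (body.filter (fun l => decide (PySem.Str.len (PySem.Str.strip l) > 0))),
                 ([] : List String), l) := by
            simp only [pvGroupStepA]; rw [if_pos h, if_pos hp, if_pos hk]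
          have hins : pvInsertSeg groups (key, body)
              = groups.insert key (body.filter (fun l => decide (PySem.Str.len (PySem.Str.strip l) > 0))) := by
            simp only [pvInsertSeg]; rw [if_pos ⟨hp, hk⟩]
          rw [List.foldl_cons, hstep, hins]
          exact ih _ l []
        · have hstep : pvGroupStepA
              (groups, body.filter (fun l => decide (PySem.Str.len (PySem.Str.strip l) > 0)), key) l
              = (groups, ([] : List String), l) := by
            simp only [pvGroupStepA]; rw [if_pos h, if_pos hp, if_neg hk]
          have hins : pvInsertSeg groups (key, body) = groups := by
            simp only [pvInsertSeg]; rw [if_neg (fun hc => hk hc.2)]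
          rw [List.foldl_cons, hstep, hins]
          exact ih _ l []
      · have hnil : body.filter (fun l => decide (PySem.Str.len (PySem.Str.strip l) > 0)) = [] := by
          simpa using Nat.eq_zero_of_not_pos hp
        have hstep : pvGroupStepA
            (groups, body.filter (fun l => decide (PySem.Str.len (PySem.Str.strip l) > 0)), key) l
            = (groups, ([] : List String), l) := by
          simp only [pvGroupStepA]; rw [if_pos h, hnil, if_neg (by simp)]
        have hins : pvInsertSeg groups (key, body) = groups := by
          simp only [pvInsertSeg]; rw [if_neg (fun hc => hp hc.1)]
        rw [List.foldl_cons, hstep, hins]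
        exact ih _ l []
    · have hseg : pvSegsFrom key body (l :: ls) = pvSegsFrom key (body ++ [l]) ls := by
        simp only [pvSegsFrom]; rw [if_neg h]
      have hstep : pvGroupStepA
          (groups, body.filter (fun l => decide (PySem.Str.len (PySem.Str.strip l) > 0)), key) l
          = (groups, (body ++ [l]).filter (fun l => decide (PySem.Str.len (PySem.Str.strip l) > 0)), key) := by
        simp only [pvGroupStepA]; rw [if_neg h]
        by_cases hb : is_line_not_blank l = true
        · have hb' : (decide (PySem.Str.len (PySem.Str.strip l) > 0)) = true := hb
          have hfl : List.filter (fun s => decide (PySem.Str.len (PySem.Str.strip s) > 0)) [l]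
              = [l] := by
            simp only [List.filter_cons, List.filter_nil]
            rw [if_pos hb']
          rw [if_pos hb, List.filter_append, hfl]
        · have hb' : ¬ (decide (PySem.Str.len (PySem.Str.strip l) > 0)) = true := hb
          have hfl : List.filter (fun s => decide (PySem.Str.len (PySem.Str.strip s) > 0)) [l]
              = [] := by
            simp only [List.filter_cons, List.filter_nil]
            rw [if_neg hb']
          rw [if_neg hb, List.filter_append, hfl, List.append_nil]
      rw [hseg, List.foldl_cons, hstep]
      exact ih groups key (body ++ [l])

-- ===== VERDICT (by name: the statement is the Claim_ definition above) =====
theorem group_by_versions_spec : Claim_equal_group_by_versions := by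
  intro lines _
  unfold Spec_group_by_versions
  rw [pvA_eq, pvB_eq, pvSeg_loop lines [] "" [], List.nil_append]
  exact congrArg PySem.Dict.items (pvMain lines PySem.Dict.empty "" [])
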